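-- pv_equiv track=rewrite | github.com/tjsander/advent2023 | day18/day18.py | process_instruct
-- ===== SOURCE A (Python) =====
-- def process_instruct(direction, length, dimensions):
--     current_x = dimensions[-1][1]
--     current_y = dimensions[-1][0]
--
--     new_coords = []
--
--     for i in range(0,length):
--         match (direction):
--             case "U":
--                 current_y-=1
--             case "D":
--                 current_y+=1
--             case "R":
--                 current_x+=1
--             case "L":
--                 current_x-=1
--         new_coords.append([current_y, current_x])
--     return new_coords
-- ===== SOURCE B (Python) =====
-- def process_instruct(direction, length, dimensions):
--     start_y, start_x = dimensions[-1][0], dimensions[-1][1]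
--     dy, dx = {"U": (-1, 0), "D": (1, 0), "R": (0, 1), "L": (0, -1)}.get(direction, (0, 0))
--     return [[start_y + dy * (i + 1), start_x + dx * (i + 1)] for i in range(length)]
-- ===== Notes on version B (the rewrite author's own statement) =====
-- stated objective: idiomatic
-- what changed: Replaces the stateful stepping loop with per-iteration branching by a step vector looked up once and a closed-form comprehension computing each coordinate directly from its index.
import Mathlib
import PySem

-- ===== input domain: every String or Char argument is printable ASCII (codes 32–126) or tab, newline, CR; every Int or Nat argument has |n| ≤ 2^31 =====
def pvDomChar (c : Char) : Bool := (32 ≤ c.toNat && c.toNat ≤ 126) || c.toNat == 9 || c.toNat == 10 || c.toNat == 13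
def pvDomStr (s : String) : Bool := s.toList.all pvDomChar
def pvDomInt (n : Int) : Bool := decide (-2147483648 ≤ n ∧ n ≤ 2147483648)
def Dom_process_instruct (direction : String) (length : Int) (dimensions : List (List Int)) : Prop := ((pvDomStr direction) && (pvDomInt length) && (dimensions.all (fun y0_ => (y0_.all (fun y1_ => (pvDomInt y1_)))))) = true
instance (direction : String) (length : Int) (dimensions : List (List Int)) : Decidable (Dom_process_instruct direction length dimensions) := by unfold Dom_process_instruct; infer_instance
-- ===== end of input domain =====

-- B replaces A's stateful stepping loop (per-iteration branch, mutable current point)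
-- by a step vector computed once and a closed-form map over the index (idiomatic).


-- ===== PORT A =====
-- literal transliteration: current point as mutable state, branch on direction each
-- iteration, append to the accumulator (pyGet? defaults are unreachable under Pre_)
def process_instruct (direction : String) (length : Int) (dimensions : List (List Int)) : List (List Int) :=
  let row := (PySem.List.pyGet? dimensions (-1)).getD []
  let current_x := (PySem.List.pyGet? row 1).getD 0
  let current_y := (PySem.List.pyGet? row 0).getD 0
  let st := (PySem.List.pyRange 0 length 1).foldl
    (fun (st : Int × Int × List (List Int)) _ =>
      let y := st.1
      let x := st.2.1
      let (y, x) :=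
        if direction = "U" then (y - 1, x)
        else if direction = "D" then (y + 1, x)
        else if direction = "R" then (y, x + 1)
        else if direction = "L" then (y, x - 1)
        else (y, x)
      (y, x, st.2.2 ++ [[y, x]]))
    (current_y, current_x, [])
  st.2.2

-- ===== PORT B =====
-- step vector looked up once, coordinates computed in closed form from the index
def pv_step (direction : String) : Int × Int :=
  (((PySem.Dict.empty).insert "U" ((-1 : Int), (0 : Int))
      |>.insert "D" (1, 0) |>.insert "R" (0, 1) |>.insert "L" (0, -1)).getD direction (0, 0))

def process_instruct_alt (direction : String) (length : Int) (dimensions : List (List Int)) : List (List Int) :=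
  let row := (PySem.List.pyGet? dimensions (-1)).getD []
  let start_y := (PySem.List.pyGet? row 0).getD 0
  let start_x := (PySem.List.pyGet? row 1).getD 0
  let d := pv_step direction
  (PySem.List.pyRange 0 length 1).map
    (fun i => [start_y + d.1 * (i + 1), start_x + d.2 * (i + 1)])

-- ===== PRECONDITION & SPEC =====
-- Pre_ excludes exactly the inputs where A raises IndexError:
-- empty dimensions, or a last row with fewer than two entries.
def Pre_process_instruct (direction : String) (length : Int) (dimensions : List (List Int)) : Prop :=
  dimensions ≠ [] ∧ 2 ≤ ((dimensions.getLast?).getD []).length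
instance (direction : String) (length : Int) (dimensions : List (List Int)) : Decidable (Pre_process_instruct direction length dimensions) := by unfold Pre_process_instruct; infer_instance

def pvWitness_process_instruct : String × Int × List (List Int) := ("R", 3, [[2, 5]])

def Spec_process_instruct (direction : String) (length : Int) (dimensions : List (List Int)) (out : List (List Int)) : Prop := out = process_instruct_alt direction length dimensions
instance (direction : String) (length : Int) (dimensions : List (List Int)) (out : List (List Int)) : Decidable (Spec_process_instruct direction length dimensions out) := by unfold Spec_process_instruct; infer_instance

-- ===== CLAIM (what is proved, stated in full; the proofs are below) =====
def Claim_equal_process_instruct : Prop := ∀ (direction : String) (length : Int) (dimensions : List (List Int)), Dom_process_instruct direction length dimensions → Pre_process_instruct direction length dimensions → Spec_process_instruct direction length dimensions (process_instruct direction length dimensions)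

-- ===== LEMMAS AND PROOFS =====

-- A's per-iteration branch adds exactly B's once-computed step vector
theorem step_eq (direction : String) (y x : Int) :
    (if direction = "U" then (y - 1, x)
     else if direction = "D" then (y + 1, x)
     else if direction = "R" then (y, x + 1)
     else if direction = "L" then (y, x - 1)
     else (y, x)) = (y + (pv_step direction).1, x + (pv_step direction).2) := by
  split_ifs with h1 h2 h3 h4
  · subst h1
    have h : pv_step "U" = (-1, 0) := by decide
    simp [h, sub_eq_add_neg]
  · subst h2
    have h : pv_step "D" = (1, 0) := by decide
    simp [h]
  · subst h3
    have h : pv_step "R" = (0, 1) := by decide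
    simp [h]
  · subst h4
    have h : pv_step "L" = (0, -1) := by decide
    simp [h, sub_eq_add_neg]
  · have e1 : ("U" == direction) = false := beq_eq_false_iff_ne.mpr (Ne.symm h1)
    have e2 : ("D" == direction) = false := beq_eq_false_iff_ne.mpr (Ne.symm h2)
    have e3 : ("R" == direction) = false := beq_eq_false_iff_ne.mpr (Ne.symm h3)
    have e4 : ("L" == direction) = false := beq_eq_false_iff_ne.mpr (Ne.symm h4)
    have h : pv_step direction = (0, 0) := by
      simp [pv_step, PySem.Dict.getD, PySem.Dict.get?, PySem.Dict.insert, PySem.Dict.empty,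
        List.find?, e1, e2, e3, e4]
    simp [h]

-- invariant of the stepping fold: only the iteration count matters, and the result
-- is the closed-form list shifted by the start point
theorem fold_inv_gen (dy dx : Int) (l : List Int) (y x : Int) (acc : List (List Int)) :
    (l.foldl
      (fun (st : Int × Int × List (List Int)) _ =>
        (st.1 + dy, st.2.1 + dx, st.2.2 ++ [[st.1 + dy, st.2.1 + dx]]))
      (y, x, acc)).2.2
    = acc ++ (List.range l.length).map
        (fun (i : Nat) => [y + dy * ((i : Int) + 1), x + dx * ((i : Int) + 1)]) := by
  induction l generalizing y x acc with
  | nil => simp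
  | cons a l ih =>
    rw [List.foldl_cons, ih]
    simp only [List.length_cons, List.range_succ_eq_map, List.map_cons, List.map_map,
      List.append_assoc, List.singleton_append, List.cons_append, List.nil_append]
    congr 1
    congr 1
    · congr 1 <;> push_cast <;> ring
    · apply List.map_congr_left
      intro i _
      simp only [Function.comp]
      congr 1 <;> push_cast <;> ring

theorem fold_invariant (direction : String) (l : List Int) (y x : Int) (acc : List (List Int)) :
    (l.foldl
      (fun (st : Int × Int × List (List Int)) _ =>
        let y := st.1
        let x := st.2.1
        let (y, x) :=
          if direction = "U" then (y - 1, x)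
          else if direction = "D" then (y + 1, x)
          else if direction = "R" then (y, x + 1)
          else if direction = "L" then (y, x - 1)
          else (y, x)
        (y, x, st.2.2 ++ [[y, x]]))
      (y, x, acc)).2.2
    = acc ++ (List.range l.length).map
        (fun (i : Nat) => [y + (pv_step direction).1 * ((i : Int) + 1),
                   x + (pv_step direction).2 * ((i : Int) + 1)]) := by
  have hf : (fun (st : Int × Int × List (List Int)) (_ : Int) =>
        let y := st.1
        let x := st.2.1
        let (y, x) :=
          if direction = "U" then (y - 1, x)
          else if direction = "D" then (y + 1, x)
          else if direction = "R" then (y, x + 1)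
          else if direction = "L" then (y, x - 1)
          else (y, x)
        (y, x, st.2.2 ++ [[y, x]]))
      = (fun (st : Int × Int × List (List Int)) _ =>
          (st.1 + (pv_step direction).1, st.2.1 + (pv_step direction).2,
           st.2.2 ++ [[st.1 + (pv_step direction).1, st.2.1 + (pv_step direction).2]])) := by
    funext st u
    simp only [step_eq]
  rw [hf, fold_inv_gen]

theorem pyRange_map_eq (f : Int → List Int) (n : Int) :
    (PySem.List.pyRange 0 n 1).map f = (List.range (PySem.List.pyRange 0 n 1).length).map (fun (i : Nat) => f (i : Int)) := by
  rw [PySem.List.pyRange_one]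
  simp [List.map_map, Function.comp_def]

-- ===== VERDICT (by name: the statement is the Claim_ definition above) =====
theorem process_instruct_spec : Claim_equal_process_instruct := by
  intro direction length dimensions _ _
  unfold Spec_process_instruct process_instruct process_instruct_alt
  rw [fold_invariant]
  rw [pyRange_map_eq (fun i => [((PySem.List.pyGet? ((PySem.List.pyGet? dimensions (-1)).getD []) 0).getD 0) + (pv_step direction).1 * (i + 1), ((PySem.List.pyGet? ((PySem.List.pyGet? dimensions (-1)).getD []) 1).getD 0) + (pv_step direction).2 * (i + 1)])]
  simp
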